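-- pv_equiv track=rewrite | github.com/dchou1618/Senior-Thesis | 66501/2experiments/bai-et-al-2020/analysis/probing_model_predictions.py | get_prec
-- ===== SOURCE A (Python) =====
-- def are_overlapping(interval_1,interval_2):
--     return interval_2[0] <= interval_1[1] and interval_2[1] >= interval_1[0]
--
-- def get_prec(intervals, j):
--     prec = None
--     curr_idx = j-1
--     while curr_idx >= 0:
--         curr_interval = intervals[curr_idx]
--         if (not are_overlapping(curr_interval, intervals[j])):
--             prec = curr_idx
--             break
--         curr_idx -= 1
--     return prec
-- ===== SOURCE B (Python) =====
-- def get_prec(intervals, j):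
--     if j <= 0:
--         return None
--     lo, hi = intervals[j]
--     disjoint = [i for i, (s, e) in enumerate(intervals[:j]) if e < lo or s > hi]
--     return max(disjoint, default=None)
-- ===== Notes on version B (the rewrite author's own statement) =====
-- stated objective: alternative
-- what changed: Replaces the backward sentinel scan with an early break by two staged passes: a comprehension that builds the explicit list of all non-overlapping preceding indices (with the overlap test inlined as a disjointness disjunction) and then max() over that list; a j<=0 guard returns None without touching intervals[j], as A never does either.
import Mathlib
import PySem

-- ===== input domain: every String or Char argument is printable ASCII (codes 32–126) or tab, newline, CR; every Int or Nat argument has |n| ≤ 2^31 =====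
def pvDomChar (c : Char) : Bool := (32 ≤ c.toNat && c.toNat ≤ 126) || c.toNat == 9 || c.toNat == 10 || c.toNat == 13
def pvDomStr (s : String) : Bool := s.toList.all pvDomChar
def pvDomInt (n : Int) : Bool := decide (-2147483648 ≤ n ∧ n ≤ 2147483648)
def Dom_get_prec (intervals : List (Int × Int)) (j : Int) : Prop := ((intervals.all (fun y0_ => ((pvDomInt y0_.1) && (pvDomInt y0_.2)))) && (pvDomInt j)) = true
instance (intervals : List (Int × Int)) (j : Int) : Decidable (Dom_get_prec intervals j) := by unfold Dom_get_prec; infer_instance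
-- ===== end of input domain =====

-- One line: B replaces A's backward break-at-first-hit scan by building the list of all non-overlapping preceding indices and taking its max (objective: alternative decomposition).

-- ===== PORT A =====
def are_overlapping (interval_1 interval_2 : Int × Int) : Bool :=
  interval_2.1 ≤ interval_1.2 && interval_2.2 ≥ interval_1.1

-- the while loop of A, descending on curr_idx; pyGet? = none is Python's IndexError, excluded by Pre_
def get_prec_go (intervals : List (Int × Int)) (j curr_idx : Int) : Option Int :=
  if _h : 0 ≤ curr_idx then
    match PySem.List.pyGet? intervals curr_idx, PySem.List.pyGet? intervals j with
    | some curr_interval, some ivj =>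
        if !(are_overlapping curr_interval ivj) then some curr_idx
        else get_prec_go intervals j (curr_idx - 1)
    | _, _ => none
  else none
termination_by (curr_idx + 1).toNat
decreasing_by omega

def get_prec (intervals : List (Int × Int)) (j : Int) : Option Int :=
  get_prec_go intervals j (j - 1)

-- ===== PORT B =====
def get_prec_alt (intervals : List (Int × Int)) (j : Int) : Option Int :=
  if j ≤ 0 then none
  else
    match PySem.List.pyGet? intervals j with
    | none => none   -- IndexError in Python; excluded by Pre_
    | some (lo, hi) =>
        let disjoint :=
          ((PySem.List.enumerate (PySem.List.slice intervals none (some j)) 0).filter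
            (fun p => decide (p.2.2 < lo) || decide (p.2.1 > hi))).map (·.1)
        PySem.List.max? disjoint (fun x => x)

-- ===== PRECONDITION & SPEC =====
-- A raises IndexError (intervals[j]) exactly when the loop body runs (j ≥ 1) and j ≥ len(intervals); excluded.
def Pre_get_prec (intervals : List (Int × Int)) (j : Int) : Prop :=
  j ≤ 0 ∨ j < intervals.length
instance (intervals : List (Int × Int)) (j : Int) : Decidable (Pre_get_prec intervals j) := by
  unfold Pre_get_prec; infer_instance

def pvWitness_get_prec : (List (Int × Int)) × Int := ([(0, 2), (5, 7), (6, 9)], 2)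

def Spec_get_prec (intervals : List (Int × Int)) (j : Int) (out : Option Int) : Prop := out = get_prec_alt intervals j
instance (intervals : List (Int × Int)) (j : Int) (out : Option Int) : Decidable (Spec_get_prec intervals j out) := by unfold Spec_get_prec; infer_instance

-- ===== CLAIM (what is proved, stated in full; the proofs are below) =====
def Claim_equal_get_prec : Prop := ∀ (intervals : List (Int × Int)) (j : Int), Dom_get_prec intervals j → Pre_get_prec intervals j → Spec_get_prec intervals j (get_prec intervals j)

-- ===== LEMMAS AND PROOFS =====

-- B's candidate list over the first n elements, as a function of n
def pvCand (intervals : List (Int × Int)) (lo hi : Int) (n : Nat) : List Int :=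
  ((PySem.List.enumerate (intervals.take n) 0).filter
    (fun p => decide (p.2.2 < lo) || decide (p.2.1 > hi))).map (·.1)

theorem pvCand_lt (intervals : List (Int × Int)) (lo hi : Int) (n : Nat) :
    ∀ x ∈ pvCand intervals lo hi n, x < (n : Int) := by
  intro x hx
  unfold pvCand at hx
  obtain ⟨p, hp, rfl⟩ := List.mem_map.mp hx
  have hpe := List.mem_of_mem_filter hp
  obtain ⟨k, hk, rfl⟩ := (PySem.List.mem_enumerate_iff _ _ _).mp hpe
  have : k < n := lt_of_lt_of_le hk (by simpa using List.length_take_le n intervals)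
  simp; omega

-- max of a list with a strictly larger element appended
theorem pvMaxAppend (xs : List Int) (c : Int) (h : ∀ x ∈ xs, x < c) :
    PySem.List.max? (xs ++ [c]) (fun x => x) = some c := by
  cases xs with
  | nil => simp [PySem.List.max?]
  | cons x t =>
    rw [List.cons_append, PySem.List.max?_id_cons, List.foldl_append]
    simp only [List.foldl_cons, List.foldl_nil]
    have hx : x < c := h x (by simp)
    have ht : ∀ y ∈ t, y < c := fun y hy => h y (by simp [hy])
    have key : ∀ (t : List Int) (x : Int), x < c → (∀ y ∈ t, y < c) →
        List.foldl max x t < c := by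
      intro t
      induction t with
      | nil => intro x hx _; simpa using hx
      | cons y t ih =>
        intro x hx ht'
        simp only [List.foldl_cons]
        exact ih (max x y) (max_lt hx (ht' y (by simp)))
          (fun z hz => ht' z (List.mem_cons_of_mem _ hz))
    rw [max_eq_right (le_of_lt (key t x hx ht))]

theorem pvGo_eq (intervals : List (Int × Int)) (j lo hi : Int)
    (hj : PySem.List.pyGet? intervals j = some (lo, hi)) :
    ∀ c : Nat, (c : Int) < intervals.length →
      PySem.List.max? (pvCand intervals lo hi (c + 1)) (fun x => x) =
        get_prec_go intervals j (c : Int) := by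
  intro c
  induction c with
  | zero =>
    intro hc
    have h0 : PySem.List.pyGet? intervals ((0 : Nat) : Int) = some intervals[0] :=
      PySem.List.pyGet?_ofNat (xs := intervals) (n := 0) (by exact_mod_cast hc)
    simp only [Nat.cast_zero] at h0 ⊢
    have hne : intervals ≠ [] := by intro h; simp [h] at hc
    have htake : intervals.take 1 = [intervals[0]] := by
      cases intervals with
      | nil => simp at hc
      | cons a t => simp
    rw [get_prec_go, dif_pos le_rfl]
    simp only [h0, hj]
    unfold pvCand
    rw [htake]
    by_cases hP : intervals[0].2 < lo ∨ intervals[0].1 > hi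
    · have hA : are_overlapping intervals[0] (lo, hi) = false := by
        simp [are_overlapping]; omega
      have hF : (decide (intervals[0].2 < lo) || decide (intervals[0].1 > hi)) = true := by
        simpa using hP
      rw [hA]
      simp only [Bool.not_false]
      simp [PySem.List.enumerate_cons, PySem.List.enumerate_nil, hF, PySem.List.max?]
    · have hA : are_overlapping intervals[0] (lo, hi) = true := by
        simp [are_overlapping]; omega
      have hF : (decide (intervals[0].2 < lo) || decide (intervals[0].1 > hi)) = false := by
        simpa using hP
      rw [hA]
      simp only [Bool.not_true]
      rw [if_neg (by simp), get_prec_go, dif_neg (by omega)]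
      simp [PySem.List.enumerate_cons, PySem.List.enumerate_nil, hF, PySem.List.max?]
  | succ c ih =>
    intro hc
    have hcl : (c : Int) < intervals.length := by push_cast at hc ⊢; omega
    have hcn : c + 1 < intervals.length := by exact_mod_cast hc
    have hcs : PySem.List.pyGet? intervals ((c : Int) + 1) = some intervals[c + 1] := by
      have := PySem.List.pyGet?_ofNat (xs := intervals) (n := c + 1) hcn
      push_cast at this; convert this using 2
    have htake : intervals.take (c + 1 + 1) = intervals.take (c + 1) ++ [intervals[c + 1]] := by
      rw [List.take_add_one]
      simp [List.getElem?_eq_getElem hcn]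
    have hlen : (intervals.take (c + 1)).length = c + 1 :=
      List.length_take_of_le (by omega)
    have hcand : pvCand intervals lo hi (c + 1 + 1) =
        pvCand intervals lo hi (c + 1) ++
          (if (decide (intervals[c+1].2 < lo) || decide (intervals[c+1].1 > hi)) = true
           then [((c : Int) + 1)] else []) := by
      unfold pvCand
      rw [htake, PySem.List.enumerate_append, List.filter_append, List.map_append, hlen]
      congr 1
      simp only [PySem.List.enumerate_cons, PySem.List.enumerate_nil, List.filter_cons,
        List.filter_nil]
      by_cases hF : (decide (intervals[c+1].2 < lo) || decide (intervals[c+1].1 > hi)) = true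
      · simp only [hF]
        simp
      · rw [Bool.not_eq_true] at hF
        simp only [hF]
        simp
    conv_rhs => rw [get_prec_go]
    have hstep : ((c + 1 : Nat) : Int) = (c : Int) + 1 := by push_cast; ring
    rw [hstep, dif_pos (by omega)]
    simp only [hcs, hj]
    rw [hcand]
    by_cases hP : intervals[c+1].2 < lo ∨ intervals[c+1].1 > hi
    · have hA : are_overlapping intervals[c+1] (lo, hi) = false := by
        simp [are_overlapping]; omega
      have hF : (decide (intervals[c+1].2 < lo) || decide (intervals[c+1].1 > hi)) = true := by
        simpa using hP
      rw [hA, hF, if_pos rfl]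
      simp only [Bool.not_false]
      rw [if_pos trivial]
      exact pvMaxAppend _ _ (by
        intro x hx
        have := pvCand_lt intervals lo hi (c + 1) x hx
        push_cast at this ⊢; omega)
    · have hA : are_overlapping intervals[c+1] (lo, hi) = true := by
        simp [are_overlapping]; omega
      have hF : (decide (intervals[c+1].2 < lo) || decide (intervals[c+1].1 > hi)) = false := by
        simpa using hP
      rw [hA, hF, if_neg (by simp)]
      simp only [Bool.not_true]
      rw [if_neg (by simp), List.append_nil]
      rw [show (c : Int) + 1 - 1 = (c : Int) by ring]
      exact ih hcl

-- ===== VERDICT (by name: the statement is the Claim_ definition above) =====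
theorem get_prec_spec : Claim_equal_get_prec := by
  intro intervals j _ hpre
  unfold Spec_get_prec get_prec get_prec_alt
  by_cases hj0 : j ≤ 0
  · rw [if_pos hj0, get_prec_go, dif_neg (by omega)]
  · rw [if_neg hj0]
    have hjl : j < intervals.length := hpre.resolve_left hj0
    have hjv : PySem.List.pyGet? intervals j = some intervals[j.toNat] :=
      PySem.List.pyGet?_eq_some_getElem (xs := intervals) (i := j) (h0 := by omega) (h1 := by exact_mod_cast hjl)
    rw [hjv]
    have hc : ((j - 1).toNat : Int) < intervals.length := by omega
    have := pvGo_eq intervals j intervals[j.toNat].1 intervals[j.toNat].2 (by simpa using hjv)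
      (j - 1).toNat hc
    rw [show (((j - 1).toNat : Int)) = j - 1 by omega] at this
    rw [show (j - 1).toNat + 1 = j.toNat by omega] at this
    unfold pvCand at this
    rw [show List.take j.toNat intervals = PySem.List.slice intervals none (some j) from
      (PySem.List.slice_to intervals (by omega)).symm] at this
    exact this.symm
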